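-- pv_equiv track=rewrite | github.com/jlduan/fba | fba/levenshtein.py | indexkeys
-- ===== SOURCE A (Python) =====
-- from itertools import combinations
--
-- def indexkeys(word, max_dist):
--     """Return the set of index keys ("variants") of a word.
--     >>> indexkeys('aiu', 1)
--     {'aiu', 'iu', 'au', 'ai'}
--     """
--
--     res = set()
--     wordlen = len(word)
--     limit = min(max_dist, wordlen) + 1
--
--     for dist in range(limit):
--         variants = combinations(word, wordlen - dist)
--
--         for variant in variants:
--             res.add(''.join(variant))
--
--     return res
-- ===== SOURCE B (Python) =====
-- def _levels(word, m):
--     # levels[d] = all variants of word with exactly d characters deleted,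
--     # in index-lexicographic order of the kept positions; one pass over word.
--     if not word:
--         return [['']] + [[] for _ in range(m)]
--     prev = _levels(word[1:], m)
--     cur = []
--     for d in range(m + 1):
--         lvl = [word[0] + t for t in prev[d]]
--         if d > 0:
--             lvl += prev[d - 1]
--         cur.append(lvl)
--     return cur
--
--
-- def indexkeys(word, max_dist):
--     m = min(max_dist, len(word))
--     if m < 0:
--         return set()
--     out = []
--     for lvl in _levels(word, m):
--         out += lvl
--     return set(out)
-- ===== Notes on version B (the rewrite author's own statement) =====
-- stated objective: alternative
-- what changed: Replaces the per-length itertools.combinations enumeration with incremental set.add by a single structural recursion over the word that builds all deletion levels (exactly d deletions, d = 0..min(max_dist, len(word))) at once via a keep-or-delete-first-character recurrence, concatenates the levels and deduplicates once.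
import Mathlib
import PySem

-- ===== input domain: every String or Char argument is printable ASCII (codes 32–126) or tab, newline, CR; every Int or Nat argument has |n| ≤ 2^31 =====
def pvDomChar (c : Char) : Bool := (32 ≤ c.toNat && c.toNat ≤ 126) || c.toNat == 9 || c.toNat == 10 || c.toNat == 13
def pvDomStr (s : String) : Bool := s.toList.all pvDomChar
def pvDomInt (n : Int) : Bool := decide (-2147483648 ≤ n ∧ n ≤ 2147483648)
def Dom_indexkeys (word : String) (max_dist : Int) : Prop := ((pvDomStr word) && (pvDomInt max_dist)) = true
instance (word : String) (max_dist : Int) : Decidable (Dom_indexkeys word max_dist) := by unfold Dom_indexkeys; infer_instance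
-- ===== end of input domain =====

-- B replaces the per-length itertools.combinations enumeration + set.add by one structural
-- recursion over the word building all deletion levels at once (keep-or-delete the first
-- character), then a single dedup; same cost, different algorithm (objective: alternative).

-- ===== PORT A =====
-- ''.join(variant) over a tuple of single characters is String.ofList on the char-list model (exact)
def indexkeys (word : String) (max_dist : Int) : List String :=
  let wordlen : Int := PySem.Str.len word
  let limit : Int := min max_dist wordlen + 1
  (PySem.List.pyRange 0 limit 1).foldl
    (fun res dist =>
      (PySem.List.combinations word.toList (wordlen - dist).toNat).foldl
        (fun res variant => PySem.Set.add res (String.ofList variant)) res)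
    PySem.Set.empty

-- ===== PORT B =====
-- _levels in Source B: levels[d] = variants of word with exactly d characters deleted (d = 0..m)
def pvLevels (cs : List Char) (m : Nat) : List (List String) :=
  match cs with
  | [] => [[""]] ++ List.replicate m []
  | c :: rest =>
    let prev := pvLevels rest m
    (PySem.List.pyRange 0 ((m : Int) + 1) 1).foldl
      (fun cur d =>
        cur ++ [(PySem.List.pyGetD prev d []).map (fun t => String.singleton c ++ t) ++
                (if 0 < d then PySem.List.pyGetD prev (d - 1) [] else [])])
      []

def indexkeys_alt (word : String) (max_dist : Int) : List String :=
  let m : Int := min max_dist (PySem.Str.len word)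
  if m < 0 then PySem.Set.empty
  else
    let out := (pvLevels word.toList m.toNat).foldl (fun acc lvl => acc ++ lvl) []
    PySem.Set.ofList out

-- ===== PRECONDITION & SPEC =====
def Spec_indexkeys (word : String) (max_dist : Int) (out : List String) : Prop := out = indexkeys_alt word max_dist
instance (word : String) (max_dist : Int) (out : List String) : Decidable (Spec_indexkeys word max_dist out) := by unfold Spec_indexkeys; infer_instance

-- ===== CLAIM (what is proved, stated in full; the proofs are below) =====
def Claim_equal_indexkeys : Prop := ∀ (word : String) (max_dist : Int), Dom_indexkeys word max_dist → Spec_indexkeys word max_dist (indexkeys word max_dist)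

-- ===== LEMMAS AND PROOFS =====

-- the meaning of one level: variants with exactly d deletions, lexicographic kept order
def pvLvl (cs : List Char) (d : Nat) : List String :=
  if d ≤ cs.length then (PySem.List.combinations cs (cs.length - d)).map String.ofList else []

theorem pv_singleton_append (c : Char) (l : List Char) :
    String.singleton c ++ String.ofList l = String.ofList (c :: l) := by
  rw [show (c :: l) = [c] ++ l from rfl, String.ofList_append]; rfl

-- the keep-or-delete-first-character recurrence, against pvLvl
theorem pv_lvl_cons (c : Char) (rest : List Char) (j : Nat) :
    (pvLvl rest j).map (fun t => String.singleton c ++ t) ++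
      (if 0 < j then pvLvl rest (j - 1) else []) = pvLvl (c :: rest) j := by
  unfold pvLvl
  simp only [List.length_cons]
  by_cases h0 : j = 0
  · subst h0
    rw [if_pos (Nat.zero_le _), if_pos (Nat.zero_le _), if_neg (lt_irrefl 0),
      Nat.sub_zero, Nat.sub_zero, PySem.List.combinations_cons_succ, List.map_append,
      show PySem.List.combinations rest (rest.length + 1) = [] from
        PySem.List.combinations_eq_nil_of_length_lt rest (Nat.lt_succ_self _)]
    simp [pv_singleton_append]
  · have hj : 0 < j := Nat.pos_of_ne_zero h0
    rw [if_pos hj]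
    by_cases hle : j ≤ rest.length
    · rw [if_pos hle, if_pos (by omega), if_pos (by omega)]
      have h4 : rest.length + 1 - j = (rest.length - j) + 1 := by omega
      have h5 : rest.length - (j - 1) = (rest.length - j) + 1 := by omega
      rw [h4, h5, PySem.List.combinations_cons_succ, List.map_append]
      simp [pv_singleton_append]
    · rw [if_neg hle]
      by_cases heq : j = rest.length + 1
      · rw [if_pos (by omega), if_pos (by omega)]
        have h2 : rest.length - (j - 1) = 0 := by omega
        have h3 : rest.length + 1 - j = 0 := by omega
        rw [h2, h3, PySem.List.combinations_zero, PySem.List.combinations_zero]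
        simp
      · rw [if_neg (by omega), if_neg (by omega)]
        simp

theorem pvLevels_spec (cs : List Char) (m : Nat) :
    pvLevels cs m = (List.range (m + 1)).map (fun d => pvLvl cs d) := by
  induction cs with
  | nil =>
    rw [pvLevels, List.range_succ_eq_map, List.map_cons, List.map_map]
    have h0 : pvLvl [] 0 = [""] := by simp [pvLvl, PySem.List.combinations_zero]
    have h1 : (List.range m).map (pvLvl [] ∘ Nat.succ) = List.replicate m [] := by
      rw [List.eq_replicate_iff]
      constructor
      · simp
      · intro b hb
        rcases List.mem_map.1 hb with ⟨d, _, rfl⟩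
        simp [pvLvl]
    rw [h0, h1]
    rfl
  | cons c rest ih =>
    rw [pvLevels]
    rw [PySem.List.foldl_append_singleton_eq_map]
    rw [show ((m : Int) + 1) = ((m + 1 : Nat) : Int) by push_cast; ring,
      PySem.List.pyRange_zero]
    simp only [Int.toNat_natCast, List.map_map, List.nil_append]
    apply List.map_congr_left
    intro d hd
    have hdm : d < m + 1 := List.mem_range.1 hd
    have hgd : ∀ k : Nat, k < m + 1 →
        PySem.List.pyGetD (pvLevels rest m) (k : Int) [] = pvLvl rest k := by
      intro k hk
      rw [PySem.List.pyGetD_natCast, ih]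
      rw [List.getD_eq_getElem _ _ (by simpa using hk), List.getElem_map, List.getElem_range]
    simp only [Function.comp_apply]
    by_cases h0 : d = 0
    · subst h0
      rw [hgd 0 (by omega)]
      have h := pv_lvl_cons c rest 0
      rw [if_neg (lt_irrefl 0)] at h
      simpa using h
    · have hpos : 0 < d := Nat.pos_of_ne_zero h0
      rw [if_pos (by exact_mod_cast hpos : (0:Int) < (d:Int)),
        show ((d:Int) - 1) = ((d - 1 : Nat) : Int) by omega,
        hgd (d - 1) (by omega), hgd d hdm]
      have h := pv_lvl_cons c rest d
      rw [if_pos hpos] at h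
      exact h

-- a loop 'for x in l: s.update(g(x))' over Sets is one update by the flatMap
theorem pv_foldl_update {α : Type} [BEq α] [LawfulBEq α] (l : List Int) (g : Int → List α)
    (s : PySem.Set α) :
    l.foldl (fun s x => PySem.Set.update s (g x)) s = PySem.Set.update s (l.flatMap g) := by
  induction l generalizing s with
  | nil => simp [PySem.Set.update_nil]
  | cons x t ih => simp [List.foldl_cons, ih, PySem.Set.update_append]

-- A as one ofList of the concatenated levels
theorem pv_indexkeys_eq (word : String) (max_dist : Int) :
    indexkeys word max_dist =
      PySem.Set.ofList ((PySem.List.pyRange 0 (min max_dist (PySem.Str.len word) + 1) 1).flatMap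
        (fun dist => (PySem.List.combinations word.toList
          ((PySem.Str.len word : Int) - dist).toNat).map String.ofList)) := by
  have h1 : indexkeys word max_dist =
      (PySem.List.pyRange 0 (min max_dist (PySem.Str.len word) + 1) 1).foldl
        (fun res dist => PySem.Set.update res ((PySem.List.combinations word.toList
          ((PySem.Str.len word : Int) - dist).toNat).map String.ofList)) PySem.Set.empty := by
    simp only [indexkeys]
    exact PySem.List.foldl_congr_mem _ _
      (fun res dist => PySem.Set.update res ((PySem.List.combinations word.toList
        ((PySem.Str.len word : Int) - dist).toNat).map String.ofList)) _
      (fun acc x _ => (PySem.Set.update_map_eq_foldl_add _ _ _).symm)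
  rw [h1, pv_foldl_update, PySem.Set.update_empty]

-- ===== VERDICT (by name: the statement is the Claim_ definition above) =====
theorem indexkeys_spec : Claim_equal_indexkeys := by
  intro word max_dist _
  unfold Spec_indexkeys
  rw [pv_indexkeys_eq]
  simp only [indexkeys_alt]
  have hlen : PySem.Str.len word = (word.toList.length : Int) := by
    simp [PySem.Str.len_eq]
  by_cases hneg : min max_dist (PySem.Str.len word) < 0
  · rw [if_pos hneg]
    rw [PySem.List.pyRange_one_eq_nil (by omega)]
    rfl
  · rw [if_neg hneg]
    set m : Int := min max_dist (PySem.Str.len word) with hm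
    have hm0 : 0 ≤ m := le_of_not_gt hneg
    have hmn : m ≤ (word.toList.length : Int) := by rw [hm, hlen]; exact min_le_right _ _
    congr 1
    rw [PySem.List.foldl_append_eq_flatten, List.nil_append, pvLevels_spec,
      ← List.flatMap_def]
    rw [show m + 1 = ((m.toNat + 1 : Nat) : Int) by omega, PySem.List.pyRange_zero]
    simp only [Int.toNat_natCast]
    rw [List.flatMap_map]
    apply List.flatMap_congr
    intro d hd
    have hdm : d < m.toNat + 1 := List.mem_range.1 hd
    have hdn : d ≤ word.toList.length := by omega
    rw [pvLvl, if_pos hdn, hlen,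
      show (((word.toList.length : Int)) - (d : Int)).toNat = word.toList.length - d by omega]
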